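-- pv_equiv track=rewrite | github.com/adanzl/leetcode-practice | py/q2900/Q2973.py | placedCoins
-- ===== SOURCE A (Python) =====
-- from heapq import heappush, heappushpop
-- from typing import List
--
-- def placedCoins(edges: List[List[int]], cost: List[int]) -> List[int]:
--     n = len(cost)
--     g = [[] for _ in range(n)]
--     for u, v in edges:
--         g[u].append(v)
--         g[v].append(u)
--
--     def push_l(pos_q, neg_q, val):
--         if val > 0:
--             q, v = pos_q, val
--         else:
--             q, v = neg_q, -val
--         if len(q) > 2:
--             heappushpop(q, v)
--         else:
--             heappush(q, v)
--
--     ans = [0] * n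
--
--     def dfs(idx, fa):
--         pos_q, neg_q = [], []  # - +
--         for nx in g[idx]:
--             if nx == fa: continue
--             pq, nq = dfs(nx, idx)
--             for p_n in pq:
--                 push_l(pos_q, neg_q, p_n)
--             for n_n in nq:
--                 push_l(pos_q, neg_q, -n_n)
--         push_l(pos_q, neg_q, cost[idx])
--         if len(pos_q) + len(neg_q) < 3:
--             ans[idx] = 1
--         else:
--             vv = 0
--             pos_q.sort()
--             neg_q.sort()
--             # 0 负
--             if len(pos_q) == 3:
--                 vv = max(vv, pos_q[0] * pos_q[1] * pos_q[2])
--             # 2 负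
--             if len(pos_q) >= 1 and len(neg_q) >= 2:
--                 vv = max(vv, neg_q[-1] * neg_q[-2] * pos_q[-1])
--             ans[idx] = vv
--         return pos_q, neg_q
--
--     dfs(0, -1)
--     return ans
-- ===== SOURCE B (Python) =====
-- def placedCoins(edges, cost):
--     n = len(cost)
--     g = [[] for _ in range(n)]
--     for u, v in edges:
--         g[u].append(v)
--         g[v].append(u)
--     ans = [0] * n
--
--     def dfs(idx, fa):
--         c = [cost[idx]]
--         for nx in g[idx]:
--             if nx == fa:
--                 continue
--             c.extend(dfs(nx, idx))
--         if len(c) < 3: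
--             ans[idx] = 1
--         else:
--             s = sorted(c)
--             ans[idx] = max(0, s[-1] * s[-2] * s[-3], s[0] * s[1] * s[-1])
--         return c
--
--     dfs(0, -1)
--     return ans
-- ===== Notes on version B (the rewrite author's own statement) =====
-- stated objective: simpler
-- what changed: dfs now returns the plain list of all subtree costs and each node's answer is read off one sorted copy of that list (max of 0, product of the three largest, product of the two smallest times the largest), replacing the two size-3 positive/negative heaps, the heappush/heappushpop maintenance and the pos/neg case split; Pre_ admits exactly the inputs A returns on (nonempty cost, length-2 edges with in-range labels, and an acyclic dfs call graph), excluding only inputs where A raises ValueError/IndexError/RecursionError.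
import Mathlib
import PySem

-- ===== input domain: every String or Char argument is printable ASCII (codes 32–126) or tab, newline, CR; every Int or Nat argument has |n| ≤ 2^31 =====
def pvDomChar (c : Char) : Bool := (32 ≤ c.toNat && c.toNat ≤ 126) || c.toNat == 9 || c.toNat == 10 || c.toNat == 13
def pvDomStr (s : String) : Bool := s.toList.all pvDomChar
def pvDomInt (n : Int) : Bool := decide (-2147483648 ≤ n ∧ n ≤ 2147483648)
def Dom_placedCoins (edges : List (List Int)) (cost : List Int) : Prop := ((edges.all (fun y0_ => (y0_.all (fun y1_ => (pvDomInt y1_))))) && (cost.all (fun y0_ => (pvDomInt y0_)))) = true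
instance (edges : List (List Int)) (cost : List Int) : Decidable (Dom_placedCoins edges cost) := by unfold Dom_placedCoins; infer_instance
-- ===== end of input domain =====

-- B replaces A's two size-3 heaps per node by the full sorted subtree cost list (simpler, not faster).

-- ===== PORT A =====

-- CPython heapq._siftdown, exact transliteration (all heap indices Python touches are in range)
def pvSiftdown (heap : List Int) (startpos pos : Nat) (newitem : Int) : List Int :=
  if startpos < pos then
    let parentpos := (pos - 1) / 2
    let parent := heap.getD parentpos 0
    if newitem < parent then pvSiftdown (heap.set pos parent) startpos parentpos newitem
    else heap.set pos newitem
  else heap.set pos newitem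
termination_by pos
decreasing_by omega

-- CPython heapq._siftup loop (with its trailing _siftdown call), exact
def pvSiftupLoop (heap : List Int) (startpos pos : Nat) (newitem : Int) : List Int :=
  let endpos := heap.length
  let childpos := 2 * pos + 1
  if h : childpos < endpos then
    let rightpos := childpos + 1
    let childpos := if rightpos < endpos ∧ ¬ (heap.getD childpos 0 < heap.getD rightpos 0) then rightpos else childpos
    pvSiftupLoop (heap.set pos (heap.getD childpos 0)) startpos childpos newitem
  else pvSiftdown heap startpos pos newitem
termination_by heap.length - pos
decreasing_by simp only [List.length_set]; split <;> omega

def pvHeappush (heap : List Int) (item : Int) : List Int :=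
  pvSiftdown (heap ++ [item]) 0 heap.length item

def pvHeappushpop (heap : List Int) (item : Int) : List Int :=
  if heap ≠ [] ∧ heap.getD 0 0 < item then pvSiftupLoop (heap.set 0 item) 0 0 item
  else heap

-- A's push_l
def pvPushL (posQ negQ : List Int) (val : Int) : List Int × List Int :=
  if 0 < val then
    (if 2 < posQ.length then pvHeappushpop posQ val else pvHeappush posQ val, negQ)
  else
    (posQ, if 2 < negQ.length then pvHeappushpop negQ (-val) else pvHeappush negQ (-val))

-- Python list assignment xs[i] = v (negative index wraps; Python raises out of range, total form is a no-op)
def pvSetWrap (xs : List Int) (i v : Int) : List Int :=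
  let j : Int := if i < 0 then i + xs.length else i
  if 0 ≤ j ∧ j < xs.length then xs.set j.toNat v else xs

-- g[i].append(x) on the adjacency table (same wrap rule); shared by both ports (identical Python lines)
def pvAppendAt (g : List (List Int)) (i x : Int) : List (List Int) :=
  let j : Int := if i < 0 then i + g.length else i
  if 0 ≤ j ∧ j < g.length then g.set j.toNat ((g.getD j.toNat []) ++ [x]) else g

-- g = [[] for _ in range(n)]; for u, v in edges: g[u].append(v); g[v].append(u)
def pvBuildG (n : Nat) (edges : List (List Int)) : List (List Int) :=
  edges.foldl (fun g e =>
    let u := PySem.List.pyGetD e 0 0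
    let v := PySem.List.pyGetD e 1 0
    pvAppendAt (pvAppendAt g u v) v u) (List.replicate n [])

-- A's dfs (fuel = recursion depth; on the admitted inputs the tree depth is below the fuel)
def pvDfsA (g : List (List Int)) (cost : List Int) : Nat → Int → Int → List Int → (List Int × List Int × List Int)
  | 0, _, _, ans => ([], [], ans)
  | f + 1, idx, fa, ans =>
    let st := (PySem.List.pyGetD g idx []).foldl
      (fun (st : (List Int × List Int) × List Int) nx =>
        if nx = fa then st else
          let r := pvDfsA g cost f nx idx st.2
          let st1 := r.1.foldl (fun (pn : List Int × List Int) x => pvPushL pn.1 pn.2 x) st.1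
          let st2 := r.2.1.foldl (fun (pn : List Int × List Int) x => pvPushL pn.1 pn.2 (-x)) st1
          (st2, r.2.2))
      ((([] : List Int), ([] : List Int)), ans)
    let pn := pvPushL st.1.1 st.1.2 (PySem.List.pyGetD cost idx 0)
    let posQ := pn.1
    let negQ := pn.2
    if posQ.length + negQ.length < 3 then (posQ, negQ, pvSetWrap st.2 idx 1)
    else
      let p := PySem.List.sorted posQ (fun x => x) false
      let q := PySem.List.sorted negQ (fun x => x) false
      let vv0 : Int := 0
      let vv1 := if p.length = 3 then
          max vv0 (PySem.List.pyGetD p 0 0 * PySem.List.pyGetD p 1 0 * PySem.List.pyGetD p 2 0)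
        else vv0
      let vv2 := if 1 ≤ p.length ∧ 2 ≤ q.length then
          max vv1 (PySem.List.pyGetD q (-1) 0 * PySem.List.pyGetD q (-2) 0 * PySem.List.pyGetD p (-1) 0)
        else vv1
      (p, q, pvSetWrap st.2 idx vv2)

def placedCoins (edges : List (List Int)) (cost : List Int) : List Int :=
  let n := cost.length
  let g := pvBuildG n edges
  -- fuel bounds the recursion depth; on the admitted inputs the dfs call graph is acyclic
  -- on at most (2n+1)^2 states (idx, fa), so this fuel is never exhausted there
  (pvDfsA g cost ((2 * n + 1) * (2 * n + 1) + 2) 0 (-1) (List.replicate n 0)).2.2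

-- ===== PORT B =====

-- B's dfs: returns the full list of subtree costs (same traversal, same fuel)
def pvDfsB (g : List (List Int)) (cost : List Int) : Nat → Int → Int → List Int → (List Int × List Int)
  | 0, _, _, ans => ([], ans)
  | f + 1, idx, fa, ans =>
    let st := (PySem.List.pyGetD g idx []).foldl
      (fun (st : List Int × List Int) nx =>
        if nx = fa then st else
          let r := pvDfsB g cost f nx idx st.2
          (st.1 ++ r.1, r.2))
      ([PySem.List.pyGetD cost idx 0], ans)
    let c := st.1
    if c.length < 3 then (c, pvSetWrap st.2 idx 1)
    else
      let s := PySem.List.sorted c (fun x => x) false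
      (c, pvSetWrap st.2 idx
        (max (max 0 (PySem.List.pyGetD s (-1) 0 * PySem.List.pyGetD s (-2) 0 * PySem.List.pyGetD s (-3) 0))
             (PySem.List.pyGetD s 0 0 * PySem.List.pyGetD s 1 0 * PySem.List.pyGetD s (-1) 0)))

def placedCoins_alt (edges : List (List Int)) (cost : List Int) : List Int :=
  let n := cost.length
  let g := pvBuildG n edges
  (pvDfsB g cost ((2 * n + 1) * (2 * n + 1) + 2) 0 (-1) (List.replicate n 0)).2

-- ===== PRECONDITION & SPEC =====

-- helpers for the termination check below (own copies: Pre_'s closure stays off the ports)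
def pvPreAdj (g : List (List Int)) (i x : Int) : List (List Int) :=
  let j : Int := if i < 0 then i + g.length else i
  if 0 ≤ j ∧ j < g.length then g.set j.toNat ((g.getD j.toNat []) ++ [x]) else g

def pvPreG (n : Nat) (edges : List (List Int)) : List (List Int) :=
  edges.foldl (fun g e =>
    let u := PySem.List.pyGetD e 0 0
    let v := PySem.List.pyGetD e 1 0
    pvPreAdj (pvPreAdj g u v) v u) (List.replicate n [])

-- states (idx, fa) of A's dfs reachable from (0, -1)
def pvReach (g : List (List Int)) : Nat → List (Int × Int) → List (Int × Int)
  | 0, S => S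
  | k + 1, S =>
    pvReach g k (S.foldl (fun S st =>
      (PySem.List.pyGetD g st.1 []).foldl
        (fun S x => if x ≠ st.2 ∧ ¬ (x, st.1) ∈ S then S ++ [(x, st.1)] else S) S) S)

-- repeatedly drop states with no successor left: survivors lie on infinite call paths
def pvStrip (g : List (List Int)) : Nat → List (Int × Int) → List (Int × Int)
  | 0, T => T
  | k + 1, T =>
    pvStrip g k (T.filter (fun st =>
      (PySem.List.pyGetD g st.1 []).any (fun x => decide (x ≠ st.2) && decide ((x, st.1) ∈ T))))

def pvTerminates (edges : List (List Int)) (cost : List Int) : Bool :=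
  let g := pvPreG cost.length edges
  let S := pvReach g (4 * edges.length + 2) [(0, -1)]
  (pvStrip g S.length S).isEmpty

-- Pre_ admits exactly the inputs on which A returns: cost nonempty, every edge a pair of labels
-- of legal magnitude (Python indexing accepts -n ≤ x < n), and no cycle reachable in the dfs
-- (node, parent) call graph — on the excluded inputs A raises (ValueError on an edge not of
-- length 2, IndexError on an out-of-range label or empty cost, RecursionError on a cyclic walk).
def Pre_placedCoins (edges : List (List Int)) (cost : List Int) : Prop :=
  1 ≤ cost.length ∧
  (∀ e ∈ edges, e.length = 2 ∧ ∀ x ∈ e, -(cost.length : Int) ≤ x ∧ x < (cost.length : Int)) ∧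
  pvTerminates edges cost = true

instance (edges : List (List Int)) (cost : List Int) : Decidable (Pre_placedCoins edges cost) := by
  unfold Pre_placedCoins; infer_instance

def pvWitness_placedCoins : List (List Int) × List Int := ([[0, 1], [1, 2]], [1, 2, 3])

def Spec_placedCoins (edges : List (List Int)) (cost : List Int) (out : List Int) : Prop :=
  out = placedCoins_alt edges cost
instance (edges : List (List Int)) (cost : List Int) (out : List Int) : Decidable (Spec_placedCoins edges cost out) := by
  unfold Spec_placedCoins; infer_instance

-- ===== CLAIM (what is proved, stated in full; the proofs are below) =====
def Claim_equal_placedCoins : Prop := ∀ (edges : List (List Int)) (cost : List Int), Dom_placedCoins edges cost → Pre_placedCoins edges cost → Spec_placedCoins edges cost (placedCoins edges cost)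

-- ===== LEMMAS AND PROOFS =====

-- sorted-descending toolkit
def insDesc (v : Int) : List Int → List Int
  | [] => [v]
  | a :: l => if v ≤ a then a :: insDesc v l else v :: a :: l

def sortDesc (l : List Int) : List Int := l.foldr insDesc []

-- the three largest elements, in descending order
def top3 (l : List Int) : List Int := (sortDesc l).take 3

def posOf (c : List Int) : List Int := c.filter (fun x => decide (0 < x))
def negOf (c : List Int) : List Int := (c.filter (fun x => decide (x ≤ 0))).map (fun x => -x)

theorem insDesc_perm (v : Int) (l : List Int) : (insDesc v l).Perm (v :: l) := by
  induction l with
  | nil => simp [insDesc]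
  | cons a t ih =>
    simp only [insDesc]; split
    · exact ((ih.cons a).trans (List.Perm.swap v a t))
    · exact List.Perm.refl _

theorem insDesc_pairwise {l : List Int} (h : l.Pairwise (· ≥ ·)) (v : Int) :
    (insDesc v l).Pairwise (· ≥ ·) := by
  induction l with
  | nil => simp [insDesc]
  | cons a t ih =>
    rw [List.pairwise_cons] at h
    simp only [insDesc]; split
    · rename_i hva
      refine List.pairwise_cons.mpr ⟨?_, ih h.2⟩
      intro b hb
      rcases List.mem_cons.mp ((insDesc_perm v t).mem_iff.mp hb) with rfl | hbt
      · exact hva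
      · exact h.1 b hbt
    · rename_i hva
      refine List.pairwise_cons.mpr ⟨?_, List.pairwise_cons.mpr h⟩
      intro b hb
      rcases List.mem_cons.mp hb with rfl | hbt
      · omega
      · exact le_trans (h.1 b hbt) (by omega)

theorem sortDesc_perm (l : List Int) : (sortDesc l).Perm l := by
  induction l with
  | nil => simp [sortDesc]
  | cons a t ih => exact (insDesc_perm a (sortDesc t)).trans (ih.cons a)

theorem sortDesc_pairwise (l : List Int) : (sortDesc l).Pairwise (· ≥ ·) := by
  induction l with
  | nil => simp [sortDesc]
  | cons a t ih => exact insDesc_pairwise ih a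

theorem eq_of_perm_of_pairwise_ge {l l' : List Int} (hp : l.Perm l')
    (h1 : l.Pairwise (· ≥ ·)) (h2 : l'.Pairwise (· ≥ ·)) : l = l' :=
  List.Perm.eq_of_pairwise (fun _ _ _ _ hab hba => le_antisymm hba hab) h1 h2 hp

theorem sortDesc_eq_of_pairwise {l : List Int} (h : l.Pairwise (· ≥ ·)) : sortDesc l = l :=
  eq_of_perm_of_pairwise_ge (sortDesc_perm l) (sortDesc_pairwise l) h

theorem sortDesc_congr {l l' : List Int} (h : l.Perm l') : sortDesc l = sortDesc l' :=
  eq_of_perm_of_pairwise_ge ((sortDesc_perm l).trans (h.trans (sortDesc_perm l').symm))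
    (sortDesc_pairwise l) (sortDesc_pairwise l')

theorem take3_insDesc (l : List Int) (v : Int) :
    (insDesc v l).take 3 = (insDesc v (l.take 3)).take 3 := by
  match l with
  | [] => rfl
  | [a] => rfl
  | [a, b] => rfl
  | [a, b, c] => rfl
  | a :: b :: c :: d :: t =>
    show (insDesc v (a :: b :: c :: d :: t)).take 3 = (insDesc v [a, b, c]).take 3
    simp only [insDesc]
    split_ifs <;> simp_all [List.take]

theorem top3_cons (v : Int) (l : List Int) : top3 (v :: l) = (insDesc v (top3 l)).take 3 := by
  have h : sortDesc (v :: l) = insDesc v (sortDesc l) := rfl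
  rw [top3, h, take3_insDesc (sortDesc l) v]; rfl

theorem top3_congr {l l' : List Int} (h : l.Perm l') : top3 l = top3 l' := by
  rw [top3, top3, sortDesc_congr h]

theorem top3_pairwise (l : List Int) : (top3 l).Pairwise (· ≥ ·) :=
  List.Pairwise.sublist (List.take_sublist 3 _) (sortDesc_pairwise l)

theorem length_top3 (l : List Int) : (top3 l).length = min 3 l.length := by
  simp [top3, (sortDesc_perm l).length_eq]

theorem top3_of_len_le {l : List Int} (h : l.length ≤ 3) : top3 l = sortDesc l := by
  rw [top3, List.take_of_length_le]; rwa [(sortDesc_perm l).length_eq]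

theorem top3_top3 (l : List Int) : top3 (top3 l) = top3 l := by
  rw [top3_of_len_le (by rw [length_top3]; omega), sortDesc_eq_of_pairwise (top3_pairwise l)]

theorem mem_top3 {x : Int} {l : List Int} (h : x ∈ top3 l) : x ∈ l :=
  (sortDesc_perm l).mem_iff.mp (List.mem_of_mem_take h)

theorem top3_append_left (xs ys : List Int) : top3 (xs ++ ys) = top3 (top3 xs ++ ys) := by
  induction ys with
  | nil => simp [top3_top3]
  | cons y t ih =>
    have h1 : top3 (xs ++ y :: t) = top3 (y :: (xs ++ t)) := top3_congr List.perm_middle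
    have h2 : top3 (top3 xs ++ y :: t) = top3 (y :: (top3 xs ++ t)) := top3_congr List.perm_middle
    rw [h1, h2, top3_cons, top3_cons, ih]

theorem top3_append_right (xs ys : List Int) : top3 (xs ++ ys) = top3 (xs ++ top3 ys) := by
  rw [top3_congr (List.perm_append_comm), top3_append_left,
    top3_congr (List.perm_append_comm (l₁ := top3 ys))]

theorem insDesc_of_min {l : List Int} {v : Int} (h : ∀ x ∈ l, v ≤ x) : insDesc v l = l ++ [v] := by
  induction l with
  | nil => rfl
  | cons a t ih =>
    simp only [insDesc, if_pos (h a (List.mem_cons_self))]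
    rw [ih (fun x hx => h x (List.mem_cons_of_mem a hx))]; rfl

-- heap shape invariant A's queues satisfy (length ≤ 3, root minimal)
def heapInv : List Int → Prop
  | [] => True
  | [_] => True
  | [a, b] => a ≤ b
  | [a, b, c] => a ≤ b ∧ a ≤ c
  | _ => False

theorem push_nil (v : Int) : pvHeappush [] v = [v] := by
  simp [pvHeappush, pvSiftdown]

theorem push_one (a v : Int) : pvHeappush [a] v = if v < a then [v, a] else [a, v] := by
  simp only [pvHeappush]
  rw [pvSiftdown]
  norm_num
  split_ifs with h
  · rw [pvSiftdown]; norm_num [List.set]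
  · simp

theorem push_two (a b v : Int) : pvHeappush [a, b] v = if v < a then [v, b, a] else [a, b, v] := by
  simp only [pvHeappush]
  rw [pvSiftdown]
  norm_num
  split_ifs with h
  · rw [pvSiftdown]; norm_num [List.set]
  · simp

theorem siftup3 (x b c v : Int) : pvSiftupLoop [x, b, c] 0 0 v =
    if ¬ b < c then (if v < c then [v, b, c] else [c, b, v])
    else (if v < b then [v, b, c] else [b, v, c]) := by
  by_cases hbc : b < c
  · rw [pvSiftupLoop]
    norm_num [show ¬ (¬ b < c) by simpa, hbc]
    rw [pvSiftupLoop]; norm_num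
    rw [pvSiftdown]; norm_num
    by_cases hvb : v < b
    · rw [if_pos hvb, if_pos hvb]; rw [pvSiftdown]; norm_num [List.set]
    · rw [if_neg hvb, if_neg hvb]
  · rw [pvSiftupLoop]
    norm_num [show ¬ b < c from hbc]
    rw [pvSiftupLoop]; norm_num
    rw [pvSiftdown]; norm_num
    by_cases hvc : v < c
    · rw [if_pos hvc, if_pos hvc]; rw [pvSiftdown]; norm_num [List.set]
    · rw [if_neg hvc, if_neg hvc]

theorem pushpop_three (a b c v : Int) :
    pvHeappushpop [a, b, c] v =
      if a < v then
        (if ¬ b < c then (if v < c then [v, b, c] else [c, b, v])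
         else (if v < b then [v, b, c] else [b, v, c]))
      else [a, b, c] := by
  simp only [pvHeappushpop]
  by_cases h1 : a < v
  · simp [h1, siftup3, List.set]
  · norm_num [h1]

theorem top3_len_le_perm {l : List Int} (h : l.length ≤ 3) : (top3 l).Perm l := by
  rw [top3_of_len_le h]; exact sortDesc_perm l

theorem top3_append_min {q : List Int} {v : Int} (hlen : 3 ≤ q.length)
    (hmin : ∀ x ∈ q, v ≤ x) : top3 (q ++ [v]) = top3 q := by
  rw [top3_append_left]
  have h1 : sortDesc (top3 q ++ [v]) = top3 q ++ [v] := by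
    rw [sortDesc_congr (List.perm_append_singleton v (top3 q))]
    show insDesc v (sortDesc (top3 q)) = _
    rw [sortDesc_eq_of_pairwise (top3_pairwise q),
      insDesc_of_min (fun x hx => hmin x (mem_top3 hx))]
  rw [top3, h1, List.take_left' (by rw [length_top3]; omega)]

theorem perm3_cycle (x y z : Int) : ([x, y, z] : List Int).Perm [y, z, x] :=
  (List.Perm.swap y x [z]).trans (List.Perm.cons y (List.Perm.swap z x []))

-- the combined push A performs (heappush below 3 elements, heappushpop at 3)
theorem pushCase_spec {q : List Int} (hq : heapInv q) (v : Int) :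
    heapInv (if 2 < q.length then pvHeappushpop q v else pvHeappush q v) ∧
    (if 2 < q.length then pvHeappushpop q v else pvHeappush q v).Perm (top3 (q ++ [v])) := by
  match q with
  | [] =>
    norm_num [push_nil]
    exact ⟨trivial, rfl⟩
  | [a] =>
    norm_num [push_one]
    refine ⟨?_, ?_⟩
    · split_ifs with h <;> simp [heapInv] <;> omega
    · have hp : (top3 [a, v]).Perm [a, v] := top3_len_le_perm (by norm_num)
      split_ifs with h
      · exact ((List.Perm.swap a v []).trans hp.symm)
      · exact hp.symm
  | [a, b] =>
    have hab : a ≤ b := hq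
    norm_num [push_two]
    refine ⟨?_, ?_⟩
    · split_ifs with h <;> simp [heapInv] <;> omega
    · have hp : (top3 [a, b, v]).Perm [a, b, v] := top3_len_le_perm (by norm_num)
      split_ifs with h
      · exact ((perm3_cycle v b a).trans (List.Perm.swap a b [v])).trans hp.symm
      · exact hp.symm
  | [a, b, c] =>
    obtain ⟨hab, hac⟩ := hq
    have hred : (if 2 < ([a, b, c] : List Int).length then pvHeappushpop [a, b, c] v
        else pvHeappush [a, b, c] v) = pvHeappushpop [a, b, c] v := by norm_num
    rw [hred, pushpop_three]
    simp only [List.cons_append, List.nil_append]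
    by_cases h1 : a < v
    · have e1 : top3 [a, b, c, v] = sortDesc [b, c, v] := by
        rw [top3_congr (List.perm_append_singleton a [b, c, v]).symm,
          top3_append_min (by norm_num) (by
            intro x hx
            simp only [List.mem_cons, List.not_mem_nil, or_false] at hx
            rcases hx with rfl | rfl | rfl <;> omega),
          top3_of_len_le (by norm_num)]
      have hfin : (top3 [a, b, c, v]).Perm [b, c, v] := by rw [e1]; exact sortDesc_perm _
      rw [if_pos h1]
      split_ifs with h2 h3 h3
      · exact ⟨⟨by omega, by omega⟩, (perm3_cycle v b c).trans hfin.symm⟩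
      · exact ⟨⟨by omega, by omega⟩, (List.Perm.cons b (List.Perm.swap c v [])).trans hfin.symm⟩
      · exact ⟨⟨by omega, by omega⟩, (perm3_cycle v b c).trans hfin.symm⟩
      · exact ⟨⟨by omega, by omega⟩, (List.Perm.swap b c [v]).trans hfin.symm⟩
    · have e1 : top3 [a, b, c, v] = top3 [a, b, c] := by
        have h0 : ([a, b, c, v] : List Int) = [a, b, c] ++ [v] := rfl
        rw [h0]
        exact top3_append_min (by norm_num) (by
          intro x hx
          simp only [List.mem_cons, List.not_mem_nil, or_false] at hx
          rcases hx with rfl | rfl | rfl <;> omega)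
      rw [if_neg h1, e1, top3_of_len_le (by norm_num)]
      exact ⟨⟨hab, hac⟩, (sortDesc_perm _).symm⟩

theorem pushL_spec {p n : List Int} (hp : heapInv p) (hn : heapInv n) (v : Int) :
    heapInv (pvPushL p n v).1 ∧ heapInv (pvPushL p n v).2 ∧
    (if 0 < v then (pvPushL p n v).1.Perm (top3 (p ++ [v])) ∧ (pvPushL p n v).2 = n
     else (pvPushL p n v).1 = p ∧ (pvPushL p n v).2.Perm (top3 (n ++ [-v]))) := by
  by_cases h : 0 < v
  · have hc := pushCase_spec hp v
    have e : pvPushL p n v = (if 2 < p.length then pvHeappushpop p v else pvHeappush p v, n) := by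
      simp [pvPushL, h]
    rw [e, if_pos h]
    exact ⟨hc.1, hn, hc.2, rfl⟩
  · have hc := pushCase_spec hn (-v)
    have e : pvPushL p n v = (p, if 2 < n.length then pvHeappushpop n (-v) else pvHeappush n (-v)) := by
      simp [pvPushL, h]
    rw [e, if_neg h]
    exact ⟨hp, hc.1, rfl, hc.2⟩

-- state invariant of the child loop: c is B's accumulated list, (p, n) A's queues
def SInv (c p n : List Int) : Prop :=
  heapInv p ∧ heapInv n ∧ p.Perm (top3 (posOf c)) ∧ n.Perm (top3 (negOf c))

theorem posOf_append (a b : List Int) : posOf (a ++ b) = posOf a ++ posOf b := by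
  simp [posOf]
theorem negOf_append (a b : List Int) : negOf (a ++ b) = negOf a ++ negOf b := by
  simp [negOf]

theorem SInv_congr {c c' p n : List Int} (h : c.Perm c') (hs : SInv c p n) : SInv c' p n := by
  refine ⟨hs.1, hs.2.1, hs.2.2.1.trans ?_, hs.2.2.2.trans ?_⟩
  · exact (top3_congr (List.Perm.filter _ h) : top3 (posOf c) = top3 (posOf c')) ▸ List.Perm.refl _
  · exact (top3_congr ((List.Perm.filter _ h).map _) : top3 (negOf c) = top3 (negOf c')) ▸ List.Perm.refl _

theorem SInv_push {c p n : List Int} (hs : SInv c p n) (v : Int) :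
    SInv (c ++ [v]) (pvPushL p n v).1 (pvPushL p n v).2 := by
  obtain ⟨hp, hn, hpp, hnp⟩ := hs
  obtain ⟨h1, h2, h3⟩ := pushL_spec hp hn v
  by_cases h : 0 < v
  · rw [if_pos h] at h3
    refine ⟨h1, h2, ?_, ?_⟩
    · refine h3.1.trans ?_
      have e1 : posOf (c ++ [v]) = posOf c ++ [v] := by
        simp [posOf, List.filter_append, show (0:Int) < v from h]
      rw [e1, top3_congr (hpp.append_right [v]), ← top3_append_left]
    · rw [h3.2]
      refine hnp.trans ?_
      have e2 : negOf (c ++ [v]) = negOf c := by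
        simp [negOf, List.filter_append, show ¬ v ≤ 0 by omega]
      rw [e2]
  · rw [if_neg h] at h3
    refine ⟨h1, h2, ?_, ?_⟩
    · rw [h3.1]
      refine hpp.trans ?_
      have e1 : posOf (c ++ [v]) = posOf c := by
        simp [posOf, List.filter_append, show ¬ (0:Int) < v from h]
      rw [e1]
    · refine h3.2.trans ?_
      have e2 : negOf (c ++ [v]) = negOf c ++ [-v] := by
        simp [negOf, List.filter_append, show v ≤ 0 by omega]
      rw [e2, top3_congr (hnp.append_right [-v]), ← top3_append_left]

theorem SInv_fold {xs : List Int} : ∀ {c p n : List Int}, SInv c p n →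
    SInv (c ++ xs) (xs.foldl (fun (pn : List Int × List Int) x => pvPushL pn.1 pn.2 x) (p, n)).1
      (xs.foldl (fun (pn : List Int × List Int) x => pvPushL pn.1 pn.2 x) (p, n)).2 := by
  induction xs with
  | nil => intro c p n hs; simpa using hs
  | cons x t ih =>
    intro c p n hs
    have h1 := SInv_push hs x
    have := ih (c := c ++ [x]) h1
    simpa [List.append_assoc] using this

-- pushing a child's two queues is pushing pc ++ nc.map(-·); extremes suffice
theorem SInv_child {c p n cc pc nc : List Int} (hs : SInv c p n)
    (hpc : pc.Perm (top3 (posOf cc))) (hnc : nc.Perm (top3 (negOf cc))) :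
    SInv (c ++ cc)
      ((nc.foldl (fun (pn : List Int × List Int) x => pvPushL pn.1 pn.2 (-x))
        (pc.foldl (fun (pn : List Int × List Int) x => pvPushL pn.1 pn.2 x) (p, n)))).1
      ((nc.foldl (fun (pn : List Int × List Int) x => pvPushL pn.1 pn.2 (-x))
        (pc.foldl (fun (pn : List Int × List Int) x => pvPushL pn.1 pn.2 x) (p, n)))).2 := by
  have hposmem : ∀ x ∈ pc, 0 < x := by
    intro x hx
    have hm := mem_top3 (hpc.mem_iff.mp hx)
    simp only [posOf, List.mem_filter, decide_eq_true_eq] at hm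
    exact hm.2
  have hnegmem : ∀ x ∈ nc, 0 ≤ x := by
    intro x hx
    have hm := mem_top3 (hnc.mem_iff.mp hx)
    simp only [negOf, List.mem_map, List.mem_filter, decide_eq_true_eq] at hm
    obtain ⟨y, ⟨_, hy⟩, rfl⟩ := hm
    omega
  have h1 := SInv_fold (xs := pc) hs
  have h2 := SInv_fold (xs := nc.map Neg.neg) h1
  rw [List.foldl_map] at h2
  have e_pos : top3 (posOf ((c ++ pc) ++ nc.map Neg.neg)) = top3 (posOf (c ++ cc)) := by
    rw [posOf_append, posOf_append,
      show posOf pc = pc from List.filter_eq_self.mpr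
        (fun x hx => by simpa using hposmem x hx),
      show posOf (nc.map Neg.neg) = [] from List.filter_eq_nil_iff.mpr (by
        intro x hx
        simp only [List.mem_map] at hx
        obtain ⟨y, hy, rfl⟩ := hx
        have := hnegmem y hy
        simpa using by omega),
      List.append_nil,
      top3_congr ((List.Perm.refl (posOf c)).append hpc),
      ← top3_append_right, posOf_append]
  have e_neg : top3 (negOf ((c ++ pc) ++ nc.map Neg.neg)) = top3 (negOf (c ++ cc)) := by
    have hnn : negOf (nc.map Neg.neg) = nc := by
      rw [negOf,
        show (nc.map Neg.neg).filter (fun x => decide (x ≤ 0)) = nc.map Neg.neg from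
          List.filter_eq_self.mpr (by
            intro x hx
            simp only [List.mem_map] at hx
            obtain ⟨y, hy, rfl⟩ := hx
            have := hnegmem y hy
            simpa using by omega),
        List.map_map]
      simp
    rw [negOf_append, negOf_append,
      show negOf pc = [] from by
        rw [negOf, List.filter_eq_nil_iff.mpr (by
          intro x hx
          have := hposmem x hx
          simpa using by omega)]
        rfl,
      hnn, List.append_nil,
      top3_congr ((List.Perm.refl (negOf c)).append hnc),
      ← top3_append_right, negOf_append]
  obtain ⟨hp', hn', hpp', hnp'⟩ := h2
  rw [e_pos] at hpp'
  rw [e_neg] at hnp'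
  exact ⟨hp', hn', hpp', hnp'⟩

-- lengths: posOf and negOf partition c
theorem length_split (c : List Int) : (posOf c).length + (negOf c).length = c.length := by
  induction c with
  | nil => rfl
  | cons a t ih =>
    by_cases h : 0 < a
    · have e1 : posOf (a :: t) = a :: posOf t := by
        simp [posOf, List.filter_cons, h]
      have e2 : negOf (a :: t) = negOf t := by
        simp [negOf, List.filter_cons, show ¬ a ≤ 0 by omega]
      rw [e1, e2]; simp only [List.length_cons]; omega
    · have e1 : posOf (a :: t) = posOf t := by
        simp [posOf, List.filter_cons, h]
      have e2 : negOf (a :: t) = -a :: negOf t := by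
        simp [negOf, List.filter_cons, show a ≤ 0 by omega]
      rw [e1, e2]; simp only [List.length_cons]; omega

-- B's sorted list in canonical form
def sortAsc (l : List Int) : List Int := (sortDesc l).reverse

theorem sortAsc_perm (l : List Int) : (sortAsc l).Perm l :=
  (List.reverse_perm _).trans (sortDesc_perm l)

theorem sortAsc_pairwise (l : List Int) : (sortAsc l).Pairwise (· ≤ ·) := by
  rw [sortAsc, List.pairwise_reverse]
  exact sortDesc_pairwise l

theorem pysorted_eq_sortAsc (l : List Int) :
    PySem.List.sorted l (fun x => x) false = sortAsc l :=
  PySem.List.sorted_id_eq_of_perm_of_pairwise _ _ (sortAsc_perm l) (sortAsc_pairwise l)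

-- list decomposition and indexing helpers
theorem list_rev1 {l : List Int} (h : 1 ≤ l.length) : ∃ L a, l = L ++ [a] := by
  cases hr : l.reverse with
  | nil => rw [List.reverse_eq_nil_iff] at hr; subst hr; simp at h
  | cons a t => exact ⟨t.reverse, a, by rw [← l.reverse_reverse, hr]; simp⟩

theorem list_rev2 {l : List Int} (h : 2 ≤ l.length) : ∃ L a b, l = L ++ [a, b] := by
  obtain ⟨L1, b, h1⟩ := list_rev1 (l := l) (by omega)
  have h2 : 1 ≤ L1.length := by
    have := congrArg List.length h1; simp at this; omega
  obtain ⟨L2, a, h3⟩ := list_rev1 h2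
  exact ⟨L2, a, b, by rw [h1, h3]; simp⟩

theorem list_rev3 {l : List Int} (h : 3 ≤ l.length) : ∃ L a b e, l = L ++ [a, b, e] := by
  obtain ⟨L1, e, h1⟩ := list_rev1 (l := l) (by omega)
  have h2 : 2 ≤ L1.length := by
    have := congrArg List.length h1; simp at this; omega
  obtain ⟨L2, a, b, h3⟩ := list_rev2 h2
  exact ⟨L2, a, b, e, by rw [h1, h3]; simp⟩

theorem list_left2 {l : List Int} (h : 2 ≤ l.length) : ∃ a b t, l = a :: b :: t := by
  match l with
  | a :: b :: t => exact ⟨a, b, t, rfl⟩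

theorem pgd1 (a b : Int) (t : List Int) (d : Int) : PySem.List.pyGetD (a :: b :: t) 1 d = b := by
  rw [PySem.List.pyGetD_ofNat']; rfl

theorem pgd2 (a b e : Int) (t : List Int) (d : Int) :
    PySem.List.pyGetD (a :: b :: e :: t) 2 d = e := by
  rw [PySem.List.pyGetD_ofNat']; rfl

theorem pgdm1 (L : List Int) (x d : Int) : PySem.List.pyGetD (L ++ [x]) (-1) d = x := by
  rw [PySem.List.pyGetD_neg_ofNat _ 1 d (by norm_num) (by simp)]
  simp

theorem pgdm1' (L : List Int) (x y d : Int) : PySem.List.pyGetD (L ++ [x, y]) (-1) d = y := by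
  have h : L ++ [x, y] = (L ++ [x]) ++ [y] := by simp
  rw [h, pgdm1]

theorem pgdm2 (L : List Int) (x y d : Int) : PySem.List.pyGetD (L ++ [x, y]) (-2) d = x := by
  rw [PySem.List.pyGetD_neg_ofNat _ 2 d (by norm_num) (by simp)]
  simp [List.getElem_append_right]

theorem pgdm1'' (L : List Int) (x y z d : Int) :
    PySem.List.pyGetD (L ++ [x, y, z]) (-1) d = z := by
  have h : L ++ [x, y, z] = (L ++ [x, y]) ++ [z] := by simp
  rw [h, pgdm1]

theorem pgdm2' (L : List Int) (x y z d : Int) :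
    PySem.List.pyGetD (L ++ [x, y, z]) (-2) d = y := by
  have h : L ++ [x, y, z] = (L ++ [x]) ++ [y, z] := by simp
  rw [h, pgdm2]

theorem pgdm3 (L : List Int) (x y z d : Int) :
    PySem.List.pyGetD (L ++ [x, y, z]) (-3) d = x := by
  rw [PySem.List.pyGetD_neg_ofNat _ 3 d (by norm_num) (by simp)]
  simp [List.getElem_append_right]

theorem max_max_eq {b1 b2 : Int} (h : b1 ≤ b2) : max (max 0 b1) b2 = max 0 b2 := by
  rcases le_total b1 0 with h0 | h0
  · rw [max_eq_left h0]
  · rw [max_eq_right h0, max_eq_right h, max_eq_right (h0.trans h)]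

-- A's per-node value from the two queues, B's from the full cost list (exact port expressions)
def nodeA (posQ negQ : List Int) : Int :=
  let p := PySem.List.sorted posQ (fun x => x) false
  let q := PySem.List.sorted negQ (fun x => x) false
  let vv0 : Int := 0
  let vv1 := if p.length = 3 then
      max vv0 (PySem.List.pyGetD p 0 0 * PySem.List.pyGetD p 1 0 * PySem.List.pyGetD p 2 0)
    else vv0
  if 1 ≤ p.length ∧ 2 ≤ q.length then
    max vv1 (PySem.List.pyGetD q (-1) 0 * PySem.List.pyGetD q (-2) 0 * PySem.List.pyGetD p (-1) 0)
  else vv1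

def nodeB (c : List Int) : Int :=
  let s := PySem.List.sorted c (fun x => x) false
  max (max 0 (PySem.List.pyGetD s (-1) 0 * PySem.List.pyGetD s (-2) 0 * PySem.List.pyGetD s (-3) 0))
      (PySem.List.pyGetD s 0 0 * PySem.List.pyGetD s 1 0 * PySem.List.pyGetD s (-1) 0)

-- small literal-list corollaries of the getters above
theorem pgdm1_1 (x d : Int) : PySem.List.pyGetD [x] (-1) d = x := pgdm1 [] x d
theorem pgdm1_2 (x y d : Int) : PySem.List.pyGetD [x, y] (-1) d = y := pgdm1' [] x y d
theorem pgdm1_3 (x y z d : Int) : PySem.List.pyGetD [x, y, z] (-1) d = z := pgdm1'' [] x y z d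

theorem list_len1 {l : List Int} (h : l.length = 1) : ∃ a, l = [a] := by
  match l, h with
  | [a], _ => exact ⟨a, rfl⟩

theorem list_len2 {l : List Int} (h : l.length = 2) : ∃ a b, l = [a, b] := by
  match l, h with
  | [a, b], _ => exact ⟨a, b, rfl⟩

theorem sorted_le {l : List Int} (h : l.Pairwise (· ≤ ·)) {i j : Nat} (hij : i ≤ j)
    (hj : j < l.length) : l[i]'(by omega) ≤ l[j] := by
  rcases Nat.eq_or_lt_of_le hij with rfl | hlt
  · exact le_refl _
  · exact List.pairwise_iff_getElem.mp h i j (by omega) hj hlt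

-- the per-node value: A's two-queue formula equals B's sorted-list formula
theorem node_value {c posQ negQ : List Int} (hlen : 3 ≤ c.length)
    (hpp : posQ.Perm (top3 (posOf c))) (hnp : negQ.Perm (top3 (negOf c))) :
    nodeA posQ negQ = nodeB c := by
  set NL := sortAsc (c.filter (fun v => decide (v ≤ 0))) with hNLdef
  set PL := sortAsc (posOf c) with hPLdef
  have hPLpos : ∀ v ∈ PL, 0 < v := by
    intro v hv
    have hm := (sortAsc_perm (posOf c)).mem_iff.mp hv
    simp only [posOf, List.mem_filter, decide_eq_true_eq] at hm
    exact hm.2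
  have hNLnp : ∀ v ∈ NL, v ≤ 0 := by
    intro v hv
    have hm := (sortAsc_perm _).mem_iff.mp hv
    simp only [List.mem_filter, decide_eq_true_eq] at hm
    exact hm.2
  have hPLsort : PL.Pairwise (· ≤ ·) := sortAsc_pairwise _
  have hNLsort : NL.Pairwise (· ≤ ·) := sortAsc_pairwise _
  have hmk : NL.length + PL.length = c.length := by
    rw [hNLdef, hPLdef, (sortAsc_perm _).length_eq, (sortAsc_perm _).length_eq]
    have hls := length_split c
    rw [negOf, List.length_map] at hls
    omega
  have hs : PySem.List.sorted c (fun v => v) false = NL ++ PL := by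
    apply PySem.List.sorted_id_eq_of_perm_of_pairwise
    · refine ((sortAsc_perm _).append (sortAsc_perm _)).trans ?_
      have hfc : c.filter (fun v => !decide (v ≤ 0)) = posOf c := by
        apply List.filter_congr
        intro v _
        by_cases hv : v ≤ 0
        · simp [hv, show ¬ (0 < v) by omega]
        · simp [hv, show 0 < v by omega]
      rw [← hfc]
      exact List.filter_append_perm _ c
    · rw [List.pairwise_append]
      exact ⟨hNLsort, hPLsort, fun a ha b hb => le_trans (hNLnp a ha) (le_of_lt (hPLpos b hb))⟩
  have hp : PySem.List.sorted posQ (fun v => v) false = (PL.reverse.take 3).reverse := by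
    rw [pysorted_eq_sortAsc, sortAsc, sortDesc_congr hpp,
      sortDesc_eq_of_pairwise (top3_pairwise _)]
    congr 1
    rw [top3, hPLdef, sortAsc, List.reverse_reverse]
  have hq : PySem.List.sorted negQ (fun v => v) false = ((NL.take 3).map (fun v => -v)).reverse := by
    rw [pysorted_eq_sortAsc, sortAsc, sortDesc_congr hnp,
      sortDesc_eq_of_pairwise (top3_pairwise _)]
    congr 1
    rw [top3]
    have hdesc : sortDesc (negOf c) = NL.map (fun v => -v) := by
      apply eq_of_perm_of_pairwise_ge
      · exact (sortDesc_perm _).trans ((sortAsc_perm _).map _).symm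
      · exact sortDesc_pairwise _
      · exact List.Pairwise.map _ (fun a b hab => by simp; omega) hNLsort
    rw [hdesc, List.map_take]
  have hksplit : PL.length = 0 ∨ PL.length = 1 ∨ PL.length = 2 ∨ 3 ≤ PL.length := by omega
  simp only [nodeA, nodeB]
  rcases hksplit with hk | hk | hk | hk
  · -- k = 0 : no positives, answer 0 on both sides
    have hPL0 : PL = [] := List.length_eq_zero_iff.mp hk
    have hm3 : 3 ≤ NL.length := by omega
    obtain ⟨L3, a, b, e, hNr⟩ := list_rev3 (l := NL) hm3
    obtain ⟨n0, n1, t, hN2⟩ := list_left2 (l := NL) (by omega)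
    have hsE : PySem.List.sorted c (fun v => v) false = L3 ++ [a, b, e] := by
      rw [hs, hPL0, List.append_nil, hNr]
    have ha : a ≤ 0 := hNLnp a (by rw [hNr]; simp)
    have hb : b ≤ 0 := hNLnp b (by rw [hNr]; simp)
    have he : e ≤ 0 := hNLnp e (by rw [hNr]; simp)
    have hn0 : n0 ≤ 0 := hNLnp n0 (by rw [hN2]; simp)
    have hn1 : n1 ≤ 0 := hNLnp n1 (by rw [hN2]; simp)
    have hp2 : PySem.List.sorted posQ (fun v => v) false = [] := by rw [hp, hPL0]; rfl
    rw [hp2, hsE, pgdm1'', pgdm2', pgdm3]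
    have hs0 : PySem.List.pyGetD (L3 ++ [a, b, e]) 0 0 = n0 := by
      rw [← hsE, hs, hPL0, List.append_nil, hN2]
      exact PySem.List.pyGetD_zero_cons _ _ _
    have hs1 : PySem.List.pyGetD (L3 ++ [a, b, e]) 1 0 = n1 := by
      rw [← hsE, hs, hPL0, List.append_nil, hN2]
      exact pgd1 _ _ _ _
    rw [hs0, hs1]
    have hb1 : e * b * a ≤ 0 := by nlinarith [mul_nonneg (neg_nonneg.mpr he) (neg_nonneg.mpr hb)]
    have hb2 : n0 * n1 * e ≤ 0 := by nlinarith [mul_nonneg (neg_nonneg.mpr hn0) (neg_nonneg.mpr hn1)]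
    split_ifs with h2 h1 h1
    · exact absurd h2.1 (by simp)
    · exact absurd h2.1 (by simp)
    · exact absurd h1 (by simp)
    · rw [max_eq_left hb1, max_eq_left hb2]
  · -- k = 1 : a single positive
    obtain ⟨p0, hPL1⟩ := list_len1 (l := PL) hk
    have hp0 : 0 < p0 := hPLpos p0 (by rw [hPL1]; simp)
    have hm2 : 2 ≤ NL.length := by omega
    obtain ⟨n0, n1, t, hN2⟩ := list_left2 (l := NL) hm2
    obtain ⟨L2, a, b, hNr⟩ := list_rev2 (l := NL) hm2
    have ha : a ≤ 0 := hNLnp a (by rw [hNr]; simp)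
    have hb : b ≤ 0 := hNLnp b (by rw [hNr]; simp)
    have hn0 : n0 ≤ 0 := hNLnp n0 (by rw [hN2]; simp)
    have hn1 : n1 ≤ 0 := hNLnp n1 (by rw [hN2]; simp)
    have hp2 : PySem.List.sorted posQ (fun v => v) false = [p0] := by rw [hp, hPL1]; rfl
    have hq2 : PySem.List.sorted negQ (fun v => v) false =
        ((t.take 1).map (fun v => -v)).reverse ++ [-n1, -n0] := by
      rw [hq, hN2]; simp
    have hsE : PySem.List.sorted c (fun v => v) false = L2 ++ [a, b, p0] := by
      rw [hs, hPL1, hNr]; simp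
    -- order facts  n0 ≤ a, n1 ≤ b
    have hidx0 : NL[0]'(by omega) = n0 := by simp [hN2]
    have hidx1 : NL[1]'(by omega) = n1 := by simp [hN2]
    have hidxa : NL[NL.length - 2]'(by omega) = a := by
      simp [hNr, List.getElem_append_right]
    have hidxb : NL[NL.length - 1]'(by omega) = b := by
      simp [hNr, List.getElem_append_right]
    have hn0a : n0 ≤ a := by
      rw [← hidx0, ← hidxa]; exact sorted_le hNLsort (by omega) (by omega)
    have hn1b : n1 ≤ b := by
      rw [← hidx1, ← hidxb]; exact sorted_le hNLsort (by omega) (by omega)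
    rw [hp2, hq2, hsE, pgdm1'', pgdm2', pgdm3, pgdm1', pgdm2, pgdm1_1]
    have hs0 : PySem.List.pyGetD (L2 ++ [a, b, p0]) 0 0 = n0 := by
      rw [← hsE, hs, hN2]
      simp only [List.cons_append]
      exact PySem.List.pyGetD_zero_cons _ _ _
    have hs1 : PySem.List.pyGetD (L2 ++ [a, b, p0]) 1 0 = n1 := by
      rw [← hsE, hs, hN2]
      simp only [List.cons_append]
      exact pgd1 _ _ _ _
    rw [hs0, hs1]
    have hble : p0 * b * a ≤ n0 * n1 * p0 := by
      nlinarith [mul_le_mul_of_nonneg_left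
        (show a * b ≤ n0 * n1 by nlinarith) (le_of_lt hp0)]
    split_ifs with h2 h1 h1
    · exact absurd h1 (by simp)
    · rw [max_max_eq hble, show (-n0) * (-n1) * p0 = n0 * n1 * p0 by ring]
    · exact absurd h1 (by simp)
    · exact absurd ⟨by simp, by simp⟩ h2
  · -- k = 2 : two positives
    obtain ⟨p0, p1, hPL2⟩ := list_len2 (l := PL) hk
    have hp0 : 0 < p0 := hPLpos p0 (by rw [hPL2]; simp)
    have hp1 : 0 < p1 := hPLpos p1 (by rw [hPL2]; simp)
    have hm1 : 1 ≤ NL.length := by omega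
    have hp2 : PySem.List.sorted posQ (fun v => v) false = [p0, p1] := by rw [hp, hPL2]; rfl
    rcases Nat.lt_or_ge NL.length 2 with hm | hm
    · -- m = 1
      obtain ⟨n0, hN1⟩ := list_len1 (l := NL) (by omega)
      have hn0 : n0 ≤ 0 := hNLnp n0 (by rw [hN1]; simp)
      have hq2 : PySem.List.sorted negQ (fun v => v) false = [-n0] := by
        rw [hq, hN1]; rfl
      have hsE : PySem.List.sorted c (fun v => v) false = [] ++ [n0, p0, p1] := by
        rw [hs, hN1, hPL2]; rfl
      rw [hp2, hq2, hsE, pgdm1'', pgdm2', pgdm3]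
      rw [show ([] ++ [n0, p0, p1] : List Int) = [n0, p0, p1] from rfl,
        PySem.List.pyGetD_zero_cons n0 [p0, p1] 0, pgd1 n0 p0 [p1] 0]
      have hb1 : p1 * p0 * n0 ≤ 0 := by nlinarith [mul_pos hp1 hp0]
      have hb2 : n0 * p0 * p1 ≤ 0 := by nlinarith [mul_pos hp0 hp1]
      split_ifs with h2 h1 h1
      · exact absurd h2.2 (by simp)
      · exact absurd h2.2 (by simp)
      · exact absurd h1 (by simp)
      · rw [max_eq_left hb1, max_eq_left hb2]
    · -- m ≥ 2
      obtain ⟨n0, n1, t, hN2⟩ := list_left2 (l := NL) hm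
      obtain ⟨L1, a, hNr⟩ := list_rev1 (l := NL) hm1
      have ha : a ≤ 0 := hNLnp a (by rw [hNr]; simp)
      have hn0 : n0 ≤ 0 := hNLnp n0 (by rw [hN2]; simp)
      have hn1 : n1 ≤ 0 := hNLnp n1 (by rw [hN2]; simp)
      have hq2 : PySem.List.sorted negQ (fun v => v) false =
          ((t.take 1).map (fun v => -v)).reverse ++ [-n1, -n0] := by
        rw [hq, hN2]; simp
      have hsE : PySem.List.sorted c (fun v => v) false = L1 ++ [a, p0, p1] := by
        rw [hs, hPL2, hNr]; simp
      rw [hp2, hq2, hsE, pgdm1'', pgdm2', pgdm3, pgdm1', pgdm2, pgdm1_2]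
      have hs0 : PySem.List.pyGetD (L1 ++ [a, p0, p1]) 0 0 = n0 := by
        rw [← hsE, hs, hN2]
        simp only [List.cons_append]
        exact PySem.List.pyGetD_zero_cons _ _ _
      have hs1 : PySem.List.pyGetD (L1 ++ [a, p0, p1]) 1 0 = n1 := by
        rw [← hsE, hs, hN2]
        simp only [List.cons_append]
        exact pgd1 _ _ _ _
      rw [hs0, hs1]
      have hb1 : p1 * p0 * a ≤ 0 := by nlinarith [mul_pos hp1 hp0]
      split_ifs with h2 h1 h1
      · exact absurd h1 (by simp)
      · rw [max_eq_left hb1, show (-n0) * (-n1) * p1 = n0 * n1 * p1 by ring]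
      · exact absurd h1 (by simp)
      · exact absurd ⟨by simp, by simp⟩ h2
  · -- k ≥ 3 : three or more positives
    obtain ⟨W, x, y, z, hW⟩ := list_rev3 (l := PL) hk
    obtain ⟨q0, q1, tq, hPL2⟩ := list_left2 (l := PL) (by omega)
    have hx : 0 < x := hPLpos x (by rw [hW]; simp)
    have hy : 0 < y := hPLpos y (by rw [hW]; simp)
    have hz : 0 < z := hPLpos z (by rw [hW]; simp)
    have hq0 : 0 < q0 := hPLpos q0 (by rw [hPL2]; simp)
    have hq1 : 0 < q1 := hPLpos q1 (by rw [hPL2]; simp)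
    have hp2 : PySem.List.sorted posQ (fun v => v) false = [x, y, z] := by
      rw [hp, hW]
      rw [show (W ++ [x, y, z]).reverse = [z, y, x] ++ W.reverse by simp]
      rw [List.take_left' (by simp)]
      simp
    have hsE : PySem.List.sorted c (fun v => v) false = (NL ++ W) ++ [x, y, z] := by
      rw [hs, hW, List.append_assoc]
    -- index facts for the  m = 0  inequality
    have hidxq0 : PL[0]'(by omega) = q0 := by simp [hPL2]
    have hidxq1 : PL[1]'(by omega) = q1 := by simp [hPL2]
    have hidxx : PL[PL.length - 3]'(by omega) = x := by
      simp [hW, List.getElem_append_right]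
    have hidxy : PL[PL.length - 2]'(by omega) = y := by
      simp [hW, List.getElem_append_right]
    have hq0x : q0 ≤ x := by
      rw [← hidxq0, ← hidxx]; exact sorted_le hPLsort (by omega) (by omega)
    have hq1y : q1 ≤ y := by
      rw [← hidxq1, ← hidxy]; exact sorted_le hPLsort (by omega) (by omega)
    rw [hp2, hsE, pgdm1'', pgdm2', pgdm3, PySem.List.pyGetD_zero_cons, pgd1, pgd2, pgdm1_3]
    rcases Nat.lt_or_ge NL.length 2 with hm | hm
    · rcases Nat.lt_or_ge NL.length 1 with hm0 | hm0
      · -- m = 0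
        have hN0 : NL = [] := List.length_eq_zero_iff.mp (by omega)
        have hq2 : PySem.List.sorted negQ (fun v => v) false = [] := by
          rw [hq, hN0]; rfl
        have hs0 : PySem.List.pyGetD ((NL ++ W) ++ [x, y, z]) 0 0 = q0 := by
          rw [← hsE, hs, hPL2, hN0]
          simp only [List.nil_append, List.cons_append]
          exact PySem.List.pyGetD_zero_cons _ _ _
        have hs1 : PySem.List.pyGetD ((NL ++ W) ++ [x, y, z]) 1 0 = q1 := by
          rw [← hsE, hs, hPL2, hN0]
          simp only [List.nil_append, List.cons_append]
          exact pgd1 _ _ _ _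
        rw [hq2, hs0, hs1]
        have hble : q0 * q1 * z ≤ x * y * z :=
          mul_le_mul_of_nonneg_right
            (mul_le_mul hq0x hq1y (le_of_lt hq1) (by omega)) (by omega)
        split_ifs with h2 h1 h1
        · exact absurd h2.2 (by simp)
        · exact absurd h2.2 (by simp)
        · rw [show z * y * x = x * y * z by ring]
          exact (max_eq_left (le_trans hble (le_max_right 0 _))).symm
        · exact absurd rfl h1
      · -- m = 1
        obtain ⟨n0, hN1⟩ := list_len1 (l := NL) (by omega)
        have hn0 : n0 ≤ 0 := hNLnp n0 (by rw [hN1]; simp)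
        have hq2 : PySem.List.sorted negQ (fun v => v) false = [-n0] := by
          rw [hq, hN1]; rfl
        have hs0 : PySem.List.pyGetD ((NL ++ W) ++ [x, y, z]) 0 0 = n0 := by
          rw [← hsE, hs, hN1]
          simp only [List.cons_append, List.nil_append]
          exact PySem.List.pyGetD_zero_cons _ _ _
        have hs1 : PySem.List.pyGetD ((NL ++ W) ++ [x, y, z]) 1 0 = q0 := by
          rw [← hsE, hs, hN1, hPL2]
          simp only [List.cons_append, List.nil_append]
          exact pgd1 _ _ _ _
        rw [hq2, hs0, hs1]
        have hble : n0 * q0 * z ≤ 0 := by nlinarith [mul_pos hq0 hz]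
        split_ifs with h2 h1 h1
        · exact absurd h2.2 (by simp)
        · exact absurd h2.2 (by simp)
        · rw [show z * y * x = x * y * z by ring]
          exact (max_eq_left (le_trans hble (le_max_left 0 _))).symm
        · exact absurd rfl h1
    · -- m ≥ 2
      obtain ⟨n0, n1, t, hN2⟩ := list_left2 (l := NL) hm
      have hn0 : n0 ≤ 0 := hNLnp n0 (by rw [hN2]; simp)
      have hn1 : n1 ≤ 0 := hNLnp n1 (by rw [hN2]; simp)
      have hq2 : PySem.List.sorted negQ (fun v => v) false =
          ((t.take 1).map (fun v => -v)).reverse ++ [-n1, -n0] := by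
        rw [hq, hN2]; simp
      have hs0 : PySem.List.pyGetD ((NL ++ W) ++ [x, y, z]) 0 0 = n0 := by
        rw [← hsE, hs, hN2]
        simp only [List.cons_append]
        exact PySem.List.pyGetD_zero_cons _ _ _
      have hs1 : PySem.List.pyGetD ((NL ++ W) ++ [x, y, z]) 1 0 = n1 := by
        rw [← hsE, hs, hN2]
        simp only [List.cons_append]
        exact pgd1 _ _ _ _
      rw [hq2, hs0, hs1, pgdm1', pgdm2]
      split_ifs with h2 h1 h1
      · rw [show (-n0) * (-n1) * z = n0 * n1 * z by ring,
          show z * y * x = x * y * z by ring]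
      · exact absurd rfl h1
      · exact absurd ⟨by simp, by simp⟩ h2
      · exact absurd ⟨by simp, by simp⟩ h2

-- the child loop, relating A's fold (push extremes) to B's fold (concatenate lists)
theorem fold_rel (g : List (List Int)) (cost : List Int) (f : Nat) (idx fa : Int)
    (IH : ∀ (idx' fa' : Int) (ans : List Int),
      ((pvDfsA g cost f idx' fa' ans).1).Perm (top3 (posOf (pvDfsB g cost f idx' fa' ans).1)) ∧
      ((pvDfsA g cost f idx' fa' ans).2.1).Perm (top3 (negOf (pvDfsB g cost f idx' fa' ans).1)) ∧
      (pvDfsA g cost f idx' fa' ans).2.2 = (pvDfsB g cost f idx' fa' ans).2) :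
    ∀ (ns : List Int) (p n ansA base acc cb ansB : List Int),
      SInv acc p n → ansA = ansB → cb = base ++ acc →
      ∃ acc',
        (ns.foldl (fun (st : List Int × List Int) nx =>
            if nx = fa then st else
              (st.1 ++ (pvDfsB g cost f nx idx st.2).1, (pvDfsB g cost f nx idx st.2).2))
          (cb, ansB)).1 = base ++ acc' ∧
        SInv acc'
          ((ns.foldl (fun (st : (List Int × List Int) × List Int) nx =>
              if nx = fa then st else
                (((pvDfsA g cost f nx idx st.2).2.1.foldl
                    (fun (pn : List Int × List Int) x => pvPushL pn.1 pn.2 (-x))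
                    ((pvDfsA g cost f nx idx st.2).1.foldl
                      (fun (pn : List Int × List Int) x => pvPushL pn.1 pn.2 x) st.1)),
                  (pvDfsA g cost f nx idx st.2).2.2)) ((p, n), ansA)).1.1)
          ((ns.foldl (fun (st : (List Int × List Int) × List Int) nx =>
              if nx = fa then st else
                (((pvDfsA g cost f nx idx st.2).2.1.foldl
                    (fun (pn : List Int × List Int) x => pvPushL pn.1 pn.2 (-x))
                    ((pvDfsA g cost f nx idx st.2).1.foldl
                      (fun (pn : List Int × List Int) x => pvPushL pn.1 pn.2 x) st.1)),
                  (pvDfsA g cost f nx idx st.2).2.2)) ((p, n), ansA)).1.2) ∧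
        (ns.foldl (fun (st : (List Int × List Int) × List Int) nx =>
              if nx = fa then st else
                (((pvDfsA g cost f nx idx st.2).2.1.foldl
                    (fun (pn : List Int × List Int) x => pvPushL pn.1 pn.2 (-x))
                    ((pvDfsA g cost f nx idx st.2).1.foldl
                      (fun (pn : List Int × List Int) x => pvPushL pn.1 pn.2 x) st.1)),
                  (pvDfsA g cost f nx idx st.2).2.2)) ((p, n), ansA)).2 =
        (ns.foldl (fun (st : List Int × List Int) nx =>
            if nx = fa then st else
              (st.1 ++ (pvDfsB g cost f nx idx st.2).1, (pvDfsB g cost f nx idx st.2).2))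
          (cb, ansB)).2 := by
  intro ns
  induction ns with
  | nil =>
    intro p n ansA base acc cb ansB hSI hans hcb
    exact ⟨acc, hcb, hSI, hans⟩
  | cons nx rest ih =>
    intro p n ansA base acc cb ansB hSI hans hcb
    simp only [List.foldl_cons]
    by_cases he : nx = fa
    · simp only [if_pos he]
      exact ih p n ansA base acc cb ansB hSI hans hcb
    · simp only [if_neg he]
      subst hans
      obtain ⟨hA1, hA2, hA3⟩ := IH nx idx ansA
      have hstep := SInv_child hSI hA1 hA2
      exact ih _ _ _ base (acc ++ (pvDfsB g cost f nx idx ansA).1)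
        (cb ++ (pvDfsB g cost f nx idx ansA).1) _ hstep hA3
        (by rw [hcb, List.append_assoc])

-- the main induction: A's and B's dfs agree (queues represent B's list; same answer array)
theorem dfs_rel (g : List (List Int)) (cost : List Int) :
    ∀ (f : Nat) (idx fa : Int) (ans : List Int),
      ((pvDfsA g cost f idx fa ans).1).Perm (top3 (posOf (pvDfsB g cost f idx fa ans).1)) ∧
      ((pvDfsA g cost f idx fa ans).2.1).Perm (top3 (negOf (pvDfsB g cost f idx fa ans).1)) ∧
      (pvDfsA g cost f idx fa ans).2.2 = (pvDfsB g cost f idx fa ans).2 := by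
  intro f
  induction f with
  | zero =>
    intro idx fa ans
    refine ⟨?_, ?_, rfl⟩ <;> simp [pvDfsA, pvDfsB, posOf, negOf, top3, sortDesc]
  | succ f ihf =>
    intro idx fa ans
    have eA : pvDfsA g cost (f + 1) idx fa ans =
        (let st := ((PySem.List.pyGetD g idx []).foldl
            (fun (st : (List Int × List Int) × List Int) nx =>
              if nx = fa then st else
                (((pvDfsA g cost f nx idx st.2).2.1.foldl
                    (fun (pn : List Int × List Int) x => pvPushL pn.1 pn.2 (-x))
                    ((pvDfsA g cost f nx idx st.2).1.foldl
                      (fun (pn : List Int × List Int) x => pvPushL pn.1 pn.2 x) st.1)),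
                  (pvDfsA g cost f nx idx st.2).2.2)) ((([] : List Int), ([] : List Int)), ans))
         let pn := pvPushL st.1.1 st.1.2 (PySem.List.pyGetD cost idx 0)
         if pn.1.length + pn.2.length < 3 then (pn.1, pn.2, pvSetWrap st.2 idx 1)
         else (PySem.List.sorted pn.1 (fun x => x) false, PySem.List.sorted pn.2 (fun x => x) false,
           pvSetWrap st.2 idx (nodeA pn.1 pn.2))) := rfl
    have eB : pvDfsB g cost (f + 1) idx fa ans =
        (let st := ((PySem.List.pyGetD g idx []).foldl
            (fun (st : List Int × List Int) nx =>
              if nx = fa then st else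
                (st.1 ++ (pvDfsB g cost f nx idx st.2).1, (pvDfsB g cost f nx idx st.2).2))
            ([PySem.List.pyGetD cost idx 0], ans))
         if st.1.length < 3 then (st.1, pvSetWrap st.2 idx 1)
         else (st.1, pvSetWrap st.2 idx (nodeB st.1))) := rfl
    rw [eA, eB]
    obtain ⟨acc', hB1, hSI, hans⟩ := fold_rel g cost f idx fa ihf (PySem.List.pyGetD g idx [])
      [] [] ans [PySem.List.pyGetD cost idx 0] [] [PySem.List.pyGetD cost idx 0] ans
      ⟨trivial, trivial, by simp [posOf, top3, sortDesc], by simp [negOf, top3, sortDesc]⟩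
      rfl (by simp)
    set stA := ((PySem.List.pyGetD g idx []).foldl
        (fun (st : (List Int × List Int) × List Int) nx =>
          if nx = fa then st else
            (((pvDfsA g cost f nx idx st.2).2.1.foldl
                (fun (pn : List Int × List Int) x => pvPushL pn.1 pn.2 (-x))
                ((pvDfsA g cost f nx idx st.2).1.foldl
                  (fun (pn : List Int × List Int) x => pvPushL pn.1 pn.2 x) st.1)),
              (pvDfsA g cost f nx idx st.2).2.2)) ((([] : List Int), ([] : List Int)), ans)) with hstA
    set stB := ((PySem.List.pyGetD g idx []).foldl
        (fun (st : List Int × List Int) nx =>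
          if nx = fa then st else
            (st.1 ++ (pvDfsB g cost f nx idx st.2).1, (pvDfsB g cost f nx idx st.2).2))
        ([PySem.List.pyGetD cost idx 0], ans)) with hstB
    have hc : stB.1 = PySem.List.pyGetD cost idx 0 :: acc' := hB1
    have hpush := SInv_push hSI (PySem.List.pyGetD cost idx 0)
    have hrep : SInv (PySem.List.pyGetD cost idx 0 :: acc')
        (pvPushL stA.1.1 stA.1.2 (PySem.List.pyGetD cost idx 0)).1
        (pvPushL stA.1.1 stA.1.2 (PySem.List.pyGetD cost idx 0)).2 :=
      SInv_congr (List.perm_append_singleton _ _) hpush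
    obtain ⟨hh1, hh2, hr1, hr2⟩ := hrep
    have hl1 := hr1.length_eq
    have hl2 := hr2.length_eq
    rw [length_top3] at hl1 hl2
    have hl3 := length_split (PySem.List.pyGetD cost idx 0 :: acc')
    have hcond : ((pvPushL stA.1.1 stA.1.2 (PySem.List.pyGetD cost idx 0)).1.length +
        (pvPushL stA.1.1 stA.1.2 (PySem.List.pyGetD cost idx 0)).2.length < 3) ↔
        (stB.1.length < 3) := by
      rw [hc]
      simp only [List.length_cons] at hl1 hl2 hl3 ⊢
      omega
    by_cases hsmall : stB.1.length < 3
    · rw [if_pos (hcond.mpr hsmall), if_pos hsmall, hc]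
      exact ⟨hr1, hr2, by rw [hans]⟩
    · rw [if_neg (fun hcon => hsmall (hcond.mp hcon)), if_neg hsmall]
      refine ⟨?_, ?_, ?_⟩
      · rw [hc]
        exact (PySem.List.sorted_perm _ _ _).trans hr1
      · rw [hc]
        exact (PySem.List.sorted_perm _ _ _).trans hr2
      · rw [hans, hc,
          node_value (by rw [← hc]; omega) hr1 hr2]

-- ===== VERDICT (by name: the statement is the Claim_ definition above) =====
-- ===== VERDICT (by name: the statement is the Claim_ definition above) =====
theorem placedCoins_spec : Claim_equal_placedCoins := by
  intro edges cost _ _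
  unfold Spec_placedCoins placedCoins placedCoins_alt
  exact (dfs_rel (pvBuildG cost.length edges) cost
    ((2 * cost.length + 1) * (2 * cost.length + 1) + 2) 0 (-1)
    (List.replicate cost.length 0)).2.2
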